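-- pv_equiv track=rewrite | github.com/ellencostaras/Australian-Digital-Divide-Model | ADD model.py | translate_footprints_into_quads2
-- ===== SOURCE A (Python) =====
-- def translate_footprints_into_quads2(plans, mobile):
--     '''function which translates input location strings "urban", "regional" and "remote", into the quadrants
--     that service would cover in footprint.'''
--     total_locations_operational = []
--     for p in plans:
--         if not mobile and p[1] == "wifi":
--             location = p[3]
--             if location == "remote":
--                 if not 3 in total_locations_operational:
--                     total_locations_operational.append(3)
--             elif location == "regional":
--                 if not 1 in total_locations_operational:
--                     total_locations_operational.append(1)
--                     total_locations_operational.append(2)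
--             else:
--                 if not 0 in total_locations_operational:
--                     total_locations_operational.append(0)
--         elif mobile and p[1] == "mobile":
--             location = p[3]
--             if location == "remote":
--                 total_locations_operational = [0, 1, 2, 3]
--             elif location == "regional":
--                 total_locations_operational = [0, 1, 2]
--             else:
--                 total_locations_operational = [0]
--     total_locations_operational.sort()
--     return total_locations_operational
-- ===== SOURCE B (Python) =====
-- def translate_footprints_into_quads2(plans, mobile):
--     '''function which translates input location strings "urban", "regional" and "remote", into the quadrants
--     that service would cover in footprint.'''
--     if mobile:
--         # last mobile plan wins: scan in reverse, first match decides
--         for p in reversed(plans):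
--             if p[1] == "mobile":
--                 return {"remote": [0, 1, 2, 3], "regional": [0, 1, 2]}.get(p[3], [0])
--         return []
--     quads = set()
--     for p in plans:
--         if p[1] == "wifi":
--             quads |= {"remote": {3}, "regional": {1, 2}, "urban": {0}}.get(p[3], {0})
--     return sorted(quads)
-- ===== Notes on version B (the rewrite author's own statement) =====
-- stated objective: simpler
-- what changed: Hoists the loop-invariant mobile flag out of the loop: the wifi case becomes a set-union pass over a location->quadrants table returned sorted, and the mobile case becomes a reverse scan returning the mapping of the first (i.e. last) mobile plan, replacing A's single loop with membership-guarded appends and accumulator overwrites.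
import Mathlib
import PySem

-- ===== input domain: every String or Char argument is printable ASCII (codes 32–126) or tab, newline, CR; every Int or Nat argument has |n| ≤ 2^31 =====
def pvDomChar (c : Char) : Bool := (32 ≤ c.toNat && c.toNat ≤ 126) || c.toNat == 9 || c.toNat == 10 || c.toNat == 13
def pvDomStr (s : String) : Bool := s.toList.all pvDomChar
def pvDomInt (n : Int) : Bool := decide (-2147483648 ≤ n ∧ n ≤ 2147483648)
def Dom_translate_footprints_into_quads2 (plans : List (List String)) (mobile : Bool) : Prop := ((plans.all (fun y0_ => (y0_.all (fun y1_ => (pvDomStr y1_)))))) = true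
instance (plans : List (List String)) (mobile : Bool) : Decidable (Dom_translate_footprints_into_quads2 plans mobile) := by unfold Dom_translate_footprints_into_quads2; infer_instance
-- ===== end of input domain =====

-- B hoists the invariant `mobile` test out of the loop: a set-union pass (wifi) vs a reverse first-match scan (mobile); simpler decomposition, return value only.

-- ===== PORT A =====
def aStep (mobile : Bool) (acc : List Int) (p : List String) : List Int :=
  if !mobile && ((PySem.List.pyGet? p 1).getD "" == "wifi") then
    let location := (PySem.List.pyGet? p 3).getD ""
    if location == "remote" then
      (if (3 : Int) ∈ acc then acc else acc ++ [3])
    else if location == "regional" then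
      (if (1 : Int) ∈ acc then acc else acc ++ [1, 2])
    else
      (if (0 : Int) ∈ acc then acc else acc ++ [0])
  else if mobile && ((PySem.List.pyGet? p 1).getD "" == "mobile") then
    let location := (PySem.List.pyGet? p 3).getD ""
    if location == "remote" then [0, 1, 2, 3]
    else if location == "regional" then [0, 1, 2]
    else [0]
  else acc

def translate_footprints_into_quads2 (plans : List (List String)) (mobile : Bool) : List Int :=
  PySem.List.sorted (plans.foldl (aStep mobile) []) (fun x => x) false

-- ===== PORT B =====
def bMobileVal (p : List String) : List Int :=
  PySem.Dict.getD (PySem.Dict.mk [("remote", ([0, 1, 2, 3] : List Int)), ("regional", [0, 1, 2])])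
    ((PySem.List.pyGet? p 3).getD "") [0]

def bMobileScan : List (List String) → List Int
  | [] => []
  | p :: rest =>
    if (PySem.List.pyGet? p 1).getD "" == "mobile" then bMobileVal p else bMobileScan rest

def bWifiStep (quads : PySem.Set Int) (p : List String) : PySem.Set Int :=
  if (PySem.List.pyGet? p 1).getD "" == "wifi" then
    PySem.Set.union quads
      (PySem.Dict.getD (PySem.Dict.mk [("remote", ([3] : PySem.Set Int)), ("regional", [1, 2]), ("urban", [0])])
        ((PySem.List.pyGet? p 3).getD "") [0])
  else quads

def translate_footprints_into_quads2_alt (plans : List (List String)) (mobile : Bool) : List Int :=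
  if mobile then bMobileScan plans.reverse
  else PySem.List.sorted (plans.foldl bWifiStep PySem.Set.empty) (fun x => x) false

-- ===== PRECONDITION & SPEC =====
-- Pre_ excludes exactly the inputs where A raises IndexError: a plan shorter than 2 (p[1]),
-- or a plan whose branch is taken (matching tech for the mode) shorter than 4 (p[3]).
def Pre_translate_footprints_into_quads2 (plans : List (List String)) (mobile : Bool) : Prop :=
  ∀ p ∈ plans, 2 ≤ p.length ∧
    (((mobile = false ∧ p.getD 1 "" = "wifi") ∨ (mobile = true ∧ p.getD 1 "" = "mobile")) → 4 ≤ p.length)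
instance (plans : List (List String)) (mobile : Bool) : Decidable (Pre_translate_footprints_into_quads2 plans mobile) := by unfold Pre_translate_footprints_into_quads2; infer_instance

def pvWitness_translate_footprints_into_quads2 : List (List String) × Bool :=
  ([["id1", "wifi", "x", "regional"], ["id2", "mobile", "x", "remote"]], false)

def Spec_translate_footprints_into_quads2 (plans : List (List String)) (mobile : Bool) (out : List Int) : Prop := out = translate_footprints_into_quads2_alt plans mobile
instance (plans : List (List String)) (mobile : Bool) (out : List Int) : Decidable (Spec_translate_footprints_into_quads2 plans mobile out) := by unfold Spec_translate_footprints_into_quads2; infer_instance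

-- ===== CLAIM (what is proved, stated in full; the proofs are below) =====
def Claim_equal_translate_footprints_into_quads2 : Prop := ∀ (plans : List (List String)) (mobile : Bool), Dom_translate_footprints_into_quads2 plans mobile → Pre_translate_footprints_into_quads2 plans mobile → Spec_translate_footprints_into_quads2 plans mobile (translate_footprints_into_quads2 plans mobile)

-- ===== LEMMAS AND PROOFS =====

-- literal-dict lookups as if-chains
lemma getD2 {v : Type} (loc : String) (v1 v2 d : v) :
    PySem.Dict.getD (PySem.Dict.mk [("remote", v1), ("regional", v2)]) loc d =
      if loc = "remote" then v1 else if loc = "regional" then v2 else d := by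
  by_cases h1 : loc = "remote"
  · subst h1; simp [PySem.Dict.getD, PySem.Dict.get?, List.find?]
  · have e1 : ("remote" == loc) = false := beq_eq_false_iff_ne.mpr (Ne.symm h1)
    by_cases h2 : loc = "regional"
    · subst h2; simp [PySem.Dict.getD, PySem.Dict.get?, List.find?]
    · have e2 : ("regional" == loc) = false := beq_eq_false_iff_ne.mpr (Ne.symm h2)
      simp [PySem.Dict.getD, PySem.Dict.get?, List.find?, e1, e2, h1, h2]

lemma getD3 {v : Type} (loc : String) (v1 v2 v3 d : v) :
    PySem.Dict.getD (PySem.Dict.mk [("remote", v1), ("regional", v2), ("urban", v3)]) loc d =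
      if loc = "remote" then v1 else if loc = "regional" then v2
      else if loc = "urban" then v3 else d := by
  by_cases h1 : loc = "remote"
  · subst h1; simp [PySem.Dict.getD, PySem.Dict.get?, List.find?]
  · have e1 : ("remote" == loc) = false := beq_eq_false_iff_ne.mpr (Ne.symm h1)
    by_cases h2 : loc = "regional"
    · subst h2; simp [PySem.Dict.getD, PySem.Dict.get?, List.find?, e1]
    · have e2 : ("regional" == loc) = false := beq_eq_false_iff_ne.mpr (Ne.symm h2)
      by_cases h3 : loc = "urban"
      · subst h3; simp [PySem.Dict.getD, PySem.Dict.get?, List.find?, e1, e2]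
      · have e3 : ("urban" == loc) = false := beq_eq_false_iff_ne.mpr (Ne.symm h3)
        simp [PySem.Dict.getD, PySem.Dict.get?, List.find?, e1, e2, e3, h1, h2, h3]

-- mobile case: generalized reverse scan with an explicit default
def auxScan (l : List (List String)) (s : List Int) : List Int :=
  match l with
  | [] => s
  | p :: rest => if (PySem.List.pyGet? p 1).getD "" == "mobile" then bMobileVal p else auxScan rest s

lemma bMobileScan_eq_auxScan (l : List (List String)) : bMobileScan l = auxScan l [] := by
  induction l with
  | nil => rfl
  | cons p rest ih => simp [bMobileScan, auxScan, ih]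

lemma auxScan_append (l : List (List String)) (p : List String) (s : List Int) :
    auxScan (l ++ [p]) s =
      auxScan l (if (PySem.List.pyGet? p 1).getD "" == "mobile" then bMobileVal p else s) := by
  induction l with
  | nil => simp [auxScan]
  | cons q rest ih => simp [auxScan, ih]

lemma aStep_true (s : List Int) (p : List String) :
    aStep true s p =
      if (PySem.List.pyGet? p 1).getD "" == "mobile" then bMobileVal p else s := by
  unfold aStep bMobileVal
  rw [getD2]
  simp only [Bool.not_true, Bool.false_and, Bool.true_and, Bool.false_eq_true, if_false]
  by_cases h1 : (PySem.List.pyGet? p 1).getD "" == "mobile" <;>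
    by_cases h2 : (PySem.List.pyGet? p 3).getD "" = "remote" <;>
      by_cases h3 : (PySem.List.pyGet? p 3).getD "" = "regional" <;>
        simp_all

lemma mobile_fold (plans : List (List String)) (s : List Int) :
    plans.foldl (aStep true) s = auxScan plans.reverse s := by
  induction plans generalizing s with
  | nil => rfl
  | cons p rest ih =>
    simp only [List.foldl_cons, List.reverse_cons, auxScan_append, ih, aStep_true]

lemma pairwise_bMobileVal (p : List String) : (bMobileVal p).Pairwise (· ≤ ·) := by
  unfold bMobileVal
  rw [getD2]
  split
  · decide
  · split
    · decide
    · decide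

lemma pairwise_auxScan (l : List (List String)) (s : List Int)
    (hs : s.Pairwise (· ≤ ·)) : (auxScan l s).Pairwise (· ≤ ·) := by
  induction l with
  | nil => exact hs
  | cons p rest ih =>
    simp only [auxScan]
    split
    · exact pairwise_bMobileVal p
    · exact ih

-- wifi case: A's guarded-append accumulator and B's set stay permutations of each other
lemma step_perm (a b : List Int) (p : List String) (hab : a.Perm b)
    (h12 : (1 : Int) ∈ a ↔ (2 : Int) ∈ a) : (aStep false a p).Perm (bWifiStep b p) := by
  unfold aStep bWifiStep
  rw [getD3]
  simp only [Bool.not_false, Bool.true_and, Bool.false_and, Bool.false_eq_true, if_false]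
  by_cases hw : ((PySem.List.pyGet? p 1).getD "" == "wifi") = true
  · simp only [hw, if_true]
    unfold PySem.Set.union PySem.Set.update
    generalize (PySem.List.pyGet? p 3).getD "" = loc
    by_cases h2 : loc = "remote"
    · subst h2
      simp only [String.reduceBEq, String.reduceEq, reduceIte, List.foldl, PySem.Set.add,
        PySem.Set.contains, List.contains_eq_mem, hab.mem_iff.symm, decide_eq_true_eq]
      split
      · exact hab
      · exact hab.append_right [3]
    · by_cases h3 : loc = "regional"
      · subst h3
        simp only [String.reduceBEq, String.reduceEq, reduceIte, List.foldl, PySem.Set.add,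
          PySem.Set.contains, List.contains_eq_mem, decide_eq_true_eq]
        by_cases h1a : (1 : Int) ∈ a
        · have h1b : (1 : Int) ∈ b := hab.mem_iff.mp h1a
          have h2b : (2 : Int) ∈ b := hab.mem_iff.mp (h12.mp h1a)
          simp only [if_pos h1a, if_pos h1b, if_pos h2b]
          exact hab
        · have h2a : (2 : Int) ∉ a := fun h => h1a (h12.mpr h)
          have h1b : (1 : Int) ∉ b := fun h => h1a (hab.mem_iff.mpr h)
          have h2b1 : (2 : Int) ∉ b ++ [1] := by
            simp only [List.mem_append, List.mem_singleton]
            rintro (h | h)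
            · exact h2a (hab.mem_iff.mpr h)
            · exact absurd h (by decide)
          simp only [if_neg h1a, if_neg h1b, if_neg h2b1, List.append_assoc]
          exact hab.append_right [1, 2]
      · have e2 : ¬ ((loc == "remote") = true) := by simp [h2]
        have e3 : ¬ ((loc == "regional") = true) := by simp [h3]
        rw [if_neg h2, if_neg h3]
        have hu : (if loc = "urban" then ([0] : List Int) else [0]) = [0] := by split <;> rfl
        rw [hu]
        simp only [if_neg e2, if_neg e3, List.foldl, PySem.Set.add, PySem.Set.contains,
          List.contains_eq_mem, hab.mem_iff.symm, decide_eq_true_eq]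
        split
        · exact hab
        · exact hab.append_right [0]
  · rw [if_neg hw, if_neg hw]
    exact hab

lemma step_inv (a : List Int) (p : List String)
    (h12 : (1 : Int) ∈ a ↔ (2 : Int) ∈ a) :
    ((1 : Int) ∈ aStep false a p ↔ (2 : Int) ∈ aStep false a p) := by
  unfold aStep
  simp only [Bool.not_false, Bool.true_and, Bool.false_and, Bool.false_eq_true, if_false]
  split
  · split
    · split <;> simp_all
    · split
      · split <;> simp_all
      · split <;> simp_all
  · exact h12

lemma wifi_fold (plans : List (List String)) (a b : List Int) (hab : a.Perm b)
    (h12 : (1 : Int) ∈ a ↔ (2 : Int) ∈ a) :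
    (plans.foldl (aStep false) a).Perm (plans.foldl bWifiStep b) := by
  induction plans generalizing a b with
  | nil => exact hab
  | cons p rest ih =>
    exact ih (aStep false a p) (bWifiStep b p) (step_perm a b p hab h12) (step_inv a p h12)

-- ===== VERDICT (by name: the statement is the Claim_ definition above) =====
theorem translate_footprints_into_quads2_spec : Claim_equal_translate_footprints_into_quads2 := by
  intro plans mobile _ _
  unfold Spec_translate_footprints_into_quads2 translate_footprints_into_quads2
    translate_footprints_into_quads2_alt
  cases mobile with
  | true =>
    rw [if_pos rfl, mobile_fold, bMobileScan_eq_auxScan]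
    exact PySem.List.sorted_eq_self_of_pairwise _ _
      (pairwise_auxScan plans.reverse [] List.Pairwise.nil)
  | false =>
    rw [if_neg (by simp)]
    exact PySem.List.sorted_eq_sorted_of_perm _ _ _ (fun x y h => h)
      (wifi_fold plans [] PySem.Set.empty (List.Perm.refl []) (by simp))
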